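-- pv_equiv track=rewrite | github.com/shibam120302/LeetCode | Distinct Difference - GFG/distinct-difference.py | getDistinctDifference
-- ===== SOURCE A (Python) =====
-- from typing import List
--
-- def getDistinctDifference(N : int, A : List[int]) -> List[int]:
--     left = [0 for i in range(N)]
--     se = set()
--     for i in range(1,N):
--         se.add(A[i-1])
--         left[i] = len(se)
--     diff = [0 for i in range(N)]
--     se = set()
--     for i in range(N-2,-1,-1):
--         se.add(A[i+1])
--         diff[i] = left[i]-len(se)
--     diff[-1] = left[-1]
--     return diff
-- ===== SOURCE B (Python) =====
-- from typing import List
--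
-- def getDistinctDifference(N : int, A : List[int]) -> List[int]:
--     # one forward pass: dict of remaining counts for the suffix, growing set for the prefix
--     cnt = {}
--     for x in A[:N]:
--         cnt[x] = cnt.get(x, 0) + 1
--     suffix_distinct = len(cnt)
--     left = set()
--     res = []
--     for i in range(N):
--         x = A[i]
--         cnt[x] = cnt.get(x, 0) - 1
--         if cnt[x] == 0:
--             suffix_distinct -= 1
--         res.append(len(left) - suffix_distinct)
--         left.add(x)
--     return res
-- ===== Notes on version B (the rewrite author's own statement) =====
-- stated objective: alternative
-- what changed: A fills two zero arrays with two opposite-direction index loops plus a final diff[-1] patch; B makes one forward pass keeping a dict of remaining suffix counts and a growing prefix set, appending each answer directly.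
-- outside the precondition, e.g. on getDistinctDifference(1, []): A returns [0], B raises IndexError
import Mathlib
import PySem

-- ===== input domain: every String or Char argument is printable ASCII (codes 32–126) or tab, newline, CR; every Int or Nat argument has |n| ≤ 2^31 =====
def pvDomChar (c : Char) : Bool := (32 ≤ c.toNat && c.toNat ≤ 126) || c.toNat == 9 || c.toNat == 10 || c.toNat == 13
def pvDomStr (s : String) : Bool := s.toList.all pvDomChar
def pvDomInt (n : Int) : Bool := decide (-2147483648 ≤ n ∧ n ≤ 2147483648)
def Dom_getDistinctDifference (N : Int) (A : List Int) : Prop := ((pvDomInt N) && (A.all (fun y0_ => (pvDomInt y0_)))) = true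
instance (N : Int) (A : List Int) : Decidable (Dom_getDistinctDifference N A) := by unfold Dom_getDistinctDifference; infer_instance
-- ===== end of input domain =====

-- B replaces A's two index loops over two zero-filled arrays by a single forward pass with a
-- count dict for the suffix (objective: alternative single-pass formulation, same O(n) cost).

-- ===== PORT A =====
-- literal port of A; pyGetD/pySetD are the total forms of A's xs[i] reads/writes, exact
-- under Pre_ (1 ≤ N ≤ len(A)), where every index A touches is in range.
def getDistinctDifference (N : Int) (A : List Int) : List Int :=
  let left0 : List Int := (PySem.List.pyRange 0 N 1).map (fun _ => 0)
  let s1 := (PySem.List.pyRange 1 N 1).foldl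
    (fun (st : PySem.Set Int × List Int) i =>
      let se := PySem.Set.add st.1 (PySem.List.pyGetD A (i - 1) 0)
      (se, PySem.List.pySetD st.2 i ((se.length : Int))))
    (PySem.Set.empty, left0)
  let left := s1.2
  let diff0 : List Int := (PySem.List.pyRange 0 N 1).map (fun _ => 0)
  let s2 := (PySem.List.pyRange (N - 2) (-1) (-1)).foldl
    (fun (st : PySem.Set Int × List Int) i =>
      let se := PySem.Set.add st.1 (PySem.List.pyGetD A (i + 1) 0)
      (se, PySem.List.pySetD st.2 i (PySem.List.pyGetD left i 0 - (se.length : Int))))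
    (PySem.Set.empty, diff0)
  PySem.List.pySetD s2.2 (-1) (PySem.List.pyGetD left (-1) 0)

-- ===== PORT B =====
-- literal port of Source B: counts of A[:N] in a dict, one forward pass appending to res.
def getDistinctDifference_alt (N : Int) (A : List Int) : List Int :=
  let cnt : PySem.Dict Int Int := (PySem.List.slice A none (some N)).foldl
    (fun d x => d.insert x (d.getD x 0 + 1)) PySem.Dict.empty
  let st := (PySem.List.pyRange 0 N 1).foldl
    (fun (st : PySem.Dict Int Int × Int × PySem.Set Int × List Int) i =>
      let x := PySem.List.pyGetD A i 0
      let cnt := st.1.insert x (st.1.getD x 0 - 1)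
      let sd := if cnt.getD x 0 = 0 then st.2.1 - 1 else st.2.1
      (cnt, sd, PySem.Set.add st.2.2.1 x, st.2.2.2 ++ [((st.2.2.1.length : Int) - sd)]))
    (cnt, (cnt.size : Int), PySem.Set.empty, [])
  st.2.2.2

-- ===== PRECONDITION & SPEC =====
-- Pre_ is the function's contract: N is the length of the queried prefix and must index A.
-- A raises IndexError for N ≤ 0 (diff[-1] on an empty list) and for N > len(A) (A[i] out of
-- range), except the single malformed shape N = 1 with A = [], where A accidentally returns
-- [0] while B raises IndexError; Pre_ excludes exactly those inputs.
def Pre_getDistinctDifference (N : Int) (A : List Int) : Prop := 1 ≤ N ∧ N ≤ A.length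
instance (N : Int) (A : List Int) : Decidable (Pre_getDistinctDifference N A) := by unfold Pre_getDistinctDifference; infer_instance
def pvWitness_getDistinctDifference : Int × List Int := (3, [5, 2, 5])

def Spec_getDistinctDifference (N : Int) (A : List Int) (out : List Int) : Prop := out = getDistinctDifference_alt N A
instance (N : Int) (A : List Int) (out : List Int) : Decidable (Spec_getDistinctDifference N A out) := by unfold Spec_getDistinctDifference; infer_instance

-- ===== CLAIM (what is proved, stated in full; the proofs are below) =====
def Claim_equal_getDistinctDifference : Prop := ∀ (N : Int) (A : List Int), Dom_getDistinctDifference N A → Pre_getDistinctDifference N A → Spec_getDistinctDifference N A (getDistinctDifference N A)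

-- ===== LEMMAS AND PROOFS =====
def dc (l : List Int) : Int := ((PySem.Set.ofList l).length : Int)
lemma dc_nil : dc [] = 0 := rfl
lemma dc_perm {l₁ l₂ : List Int} (h : l₁.Perm l₂) : dc l₁ = dc l₂ := by
  unfold dc
  have := ((List.perm_ext_iff_of_nodup (PySem.Set.nodup_ofList l₁)
      (PySem.Set.nodup_ofList l₂)).mpr (fun a => by
        simp [PySem.Set.mem_ofList, h.mem_iff])).length_eq
  omega
lemma ofList_snoc (l : List Int) (x : Int) :
    PySem.Set.ofList (l ++ [x]) = (PySem.Set.ofList l).add x := by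
  simp [PySem.Set.ofList_eq_foldl]
lemma length_add (s : PySem.Set Int) (x : Int) :
    ((s.add x).length : Int) = if x ∈ s then (s.length : Int) else (s.length : Int) + 1 := by
  simp [PySem.Set.add]; split_ifs <;> simp
lemma dc_snoc (l : List Int) (x : Int) :
    dc (l ++ [x]) = if x ∈ l then dc l else dc l + 1 := by
  unfold dc; rw [ofList_snoc, length_add]; simp [PySem.Set.mem_ofList]
lemma dc_cons (l : List Int) (x : Int) :
    dc (x :: l) = if x ∈ l then dc l else dc l + 1 := by
  rw [dc_perm (List.perm_append_singleton x l).symm, dc_snoc]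
def cntF (L P : List Int) : PySem.Dict Int Int :=
  PySem.Dict.mk ((PySem.Set.ofList L).map (fun k => (k, (L.count k : Int) - (P.count k : Int))))
lemma keys_cntF (L P : List Int) : (cntF L P).keys = PySem.Set.ofList L := by
  simp [cntF, PySem.Dict.keys, Function.comp_def]
lemma getD_cntF (L P : List Int) {x : Int} (hx : x ∈ L) :
    (cntF L P).getD x 0 = (L.count x : Int) - (P.count x : Int) := by
  apply PySem.Dict.getD_of_mem_items
  · simpa [cntF] using hx
  · rw [keys_cntF]; exact PySem.Set.nodup_ofList L
def stepB : (PySem.Dict Int Int × Int × PySem.Set Int × List Int) → Int →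
    (PySem.Dict Int Int × Int × PySem.Set Int × List Int) :=
  fun st x =>
    let cnt := st.1.insert x (st.1.getD x 0 - 1)
    let sd := if cnt.getD x 0 = 0 then st.2.1 - 1 else st.2.1
    (cnt, sd, PySem.Set.add st.2.2.1 x, st.2.2.2 ++ [((st.2.2.1.length : Int) - sd)])

lemma insert_cntF (L P : List Int) (x : Int) (hxL : x ∈ L) :
    (cntF L P).insert x ((cntF L P).getD x 0 - 1) = cntF L (P ++ [x]) := by
  apply PySem.Dict.ext
  rw [PySem.Dict.items_insert_of_contains]
  · show List.map _ ((PySem.Set.ofList L).map _) = _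
    rw [List.map_map]
    apply List.map_congr_left
    intro k hk
    by_cases hkx : k = x
    · subst hkx
      simp only [getD_cntF L P hxL, List.count_append, List.count_singleton]
      norm_num
      omega
    · simp only [Function.comp_apply]
      rw [if_neg (by simp [hkx])]
      simp [List.count_append, Ne.symm hkx]
  · rw [PySem.Dict.contains_iff_mem_keys, keys_cntF]
    exact (PySem.Set.mem_ofList L x).mpr hxL

lemma stepB_eq (L P S' : List Int) (x : Int) (res : List Int) (h : P ++ (x :: S') = L) :
    stepB (cntF L P, dc (x :: S'), PySem.Set.ofList P, res) x
      = (cntF L (P ++ [x]), dc S', PySem.Set.ofList (P ++ [x]), res ++ [dc P - dc S']) := by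
  have hxL : x ∈ L := by rw [← h]; simp
  have hgd : (cntF L (P ++ [x])).getD x 0 = (S'.count x : Int) := by
    rw [getD_cntF L (P ++ [x]) hxL, ← h]
    simp [List.count_append]
  have hsd : (if (cntF L (P ++ [x])).getD x 0 = 0 then dc (x :: S') - 1 else dc (x :: S')) = dc S' := by
    rw [hgd, dc_cons]
    by_cases hm : x ∈ S'
    · rw [if_pos hm, if_neg (by exact_mod_cast (List.count_eq_zero.not_left.mpr (by simpa using hm) : ¬ (S'.count x = 0)))]
    · rw [if_neg hm, if_pos (by exact_mod_cast List.count_eq_zero.mpr hm)]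
      ring
  show ((cntF L P).insert x ((cntF L P).getD x 0 - 1), _, _, _) = _
  rw [insert_cntF L P x hxL]
  refine Prod.ext rfl (Prod.ext ?_ (Prod.ext ?_ ?_))
  · exact hsd
  · exact (ofList_snoc P x).symm
  · show res ++ [((PySem.Set.ofList P).length : Int) - _] = _
    rw [hsd]
    rfl

lemma b_loop (L : List Int) : ∀ (S P res : List Int), P ++ S = L →
    S.foldl stepB (cntF L P, dc S, PySem.Set.ofList P, res)
      = (cntF L L, 0, PySem.Set.ofList L,
          res ++ (List.range S.length).map (fun k => dc (P ++ S.take k) - dc (S.drop (k + 1)))) := by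
  intro S
  induction S with
  | nil =>
    intro P res h
    simp only [List.append_nil] at h
    subst h
    simp [dc]
  | cons x S' ih =>
    intro P res h
    rw [List.foldl_cons, stepB_eq L P S' x res h,
        ih (P ++ [x]) (res ++ [dc P - dc S']) (by simpa using h)]
    rw [List.length_cons, List.range_succ_eq_map, List.map_cons, List.map_map]
    simp only [List.take_zero, List.append_nil, List.drop_succ_cons, List.drop_zero]
    rw [List.append_assoc res [dc P - dc S']]
    have hmap : List.map ((fun k => dc (P ++ List.take k (x :: S')) - dc (List.drop k S')) ∘ Nat.succ)
          (List.range S'.length)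
        = List.map (fun k => dc (P ++ [x] ++ List.take k S') - dc (List.drop (k + 1) S'))
          (List.range S'.length) := by
      apply List.map_congr_left
      intro k _
      simp [Function.comp, List.take_succ_cons, List.append_assoc]
    rw [hmap]
    simp

lemma b_eq' (N : Int) (A : List Int) (h1 : 1 ≤ N) (h2 : N ≤ A.length) :
    (let cnt : PySem.Dict Int Int := (PySem.List.slice A none (some N)).foldl
        (fun d x => d.insert x (d.getD x 0 + 1)) PySem.Dict.empty
     let st := (PySem.List.pyRange 0 N 1).foldl
       (fun (st : PySem.Dict Int Int × Int × PySem.Set Int × List Int) i =>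
         let x := PySem.List.pyGetD A i 0
         let cnt := st.1.insert x (st.1.getD x 0 - 1)
         let sd := if cnt.getD x 0 = 0 then st.2.1 - 1 else st.2.1
         (cnt, sd, PySem.Set.add st.2.2.1 x, st.2.2.2 ++ [((st.2.2.1.length : Int) - sd)]))
       (cnt, (cnt.size : Int), PySem.Set.empty, [])
     st.2.2.2)
      = (List.range N.toNat).map
          (fun k => dc ((A.take N.toNat).take k) - dc ((A.take N.toNat).drop (k + 1))) := by
  set L := A.take N.toNat with hL
  have hlen : L.length = N.toNat := by simp [hL]; omega
  have hsl : PySem.List.slice A none (some N) = L := PySem.List.slice_to A (by omega)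
  rw [hsl, PySem.Dict.foldl_insert_getD_add_one_eq_counter]
  have hcnt : PySem.Dict.counter L = cntF L [] := by
    apply PySem.Dict.ext
    rw [PySem.Dict.items_counter]
    simp [cntF]
  have hsize : ((PySem.Dict.counter L).size : Int) = dc L := by
    show ((PySem.Dict.counter L).items.length : Int) = _
    rw [PySem.Dict.items_counter]
    simp [dc]
  -- replace reads of A by reads of L, then fold over L itself
  have hra : (PySem.List.pyRange 0 N 1).foldl
      (fun (st : PySem.Dict Int Int × Int × PySem.Set Int × List Int) i =>
        stepB st (PySem.List.pyGetD A i 0))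
      (PySem.Dict.counter L, ((PySem.Dict.counter L).size : Int), PySem.Set.empty, [])
      = L.foldl stepB (PySem.Dict.counter L, ((PySem.Dict.counter L).size : Int), PySem.Set.empty, []) := by
    rw [PySem.List.foldl_congr_mem _ _
        (fun (st : PySem.Dict Int Int × Int × PySem.Set Int × List Int) i =>
          stepB st (PySem.List.pyGetD L i 0)) _
        (by
          intro acc i hi
          rw [PySem.List.mem_pyRange_one] at hi
          congr 1
          have h3 : i = ((i.toNat : Nat) : Int) := by omega
      
          rw [h3, PySem.List.pyGetD_natCast, PySem.List.pyGetD_natCast, hL]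
          rw [List.getD_eq_getElem?_getD, List.getD_eq_getElem?_getD]
          rw [List.getElem?_take]
          rw [if_pos (by omega)])]
    have h4 : N = ((L.length : Nat) : Int) := by omega
    rw [h4, PySem.List.foldl_pyRange_zero_pyGetD' L 0 stepB]
  show ((PySem.List.pyRange 0 N 1).foldl
      (fun (st : PySem.Dict Int Int × Int × PySem.Set Int × List Int) i =>
        stepB st (PySem.List.pyGetD A i 0))
      (PySem.Dict.counter L, ((PySem.Dict.counter L).size : Int), PySem.Set.empty, [])).2.2.2 = _
  rw [hra, hsize, hcnt]
  have he : (PySem.Set.empty : PySem.Set Int) = PySem.Set.ofList [] := rfl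
  have hb := b_loop L L [] [] (by simp)
  rw [he, hb]
  simp [hlen]

lemma set_map_range {n j : Nat} (f : Nat → Int) (v : Int) (hj : j < n) :
    ((List.range n).map f).set j v
      = (List.range n).map (fun k => if k = j then v else f k) := by
  apply List.ext_getElem
  · simp
  · intro k h1 h2
    simp only [List.getElem_set, List.getElem_map, List.getElem_range]
    by_cases hk : j = k
    · simp [hk]
    · simp [hk, Ne.symm hk]

def stepL (L : List Int) : (PySem.Set Int × List Int) → Int → (PySem.Set Int × List Int) :=
  fun st i =>
    let se := PySem.Set.add st.1 (PySem.List.pyGetD L (i - 1) 0)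
    (se, PySem.List.pySetD st.2 i ((se.length : Int)))

lemma a_left (L : List Int) : ∀ (j : Nat), j ≤ L.length →
    (PySem.List.pyRange 1 (j : Int) 1).foldl (stepL L)
        (PySem.Set.empty, (List.range L.length).map (fun _ => (0 : Int)))
      = (PySem.Set.ofList (L.take (j - 1)),
         (List.range L.length).map (fun k => if 1 ≤ k ∧ k < j then dc (L.take k) else 0)) := by
  intro j
  induction j with
  | zero =>
    intro _
    rw [PySem.List.pyRange_one_eq_nil (by norm_num)]
    simp
  | succ j ih =>
    intro hj
    by_cases hj0 : j = 0
    · subst hj0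
      rw [show (((0 + 1 : Nat)) : Int) = 1 by norm_num, PySem.List.pyRange_one_eq_nil (by norm_num)]
      refine Prod.ext (by simp) (List.map_congr_left ?_)
      intro k _
      exact (if_neg (by omega)).symm
    · have h1j : 1 ≤ j := Nat.one_le_iff_ne_zero.mpr hj0
      have hc : (((j + 1 : Nat)) : Int) = (j : Int) + 1 := by push_cast; ring
      rw [hc, PySem.List.pyRange_one_succ_right (by exact_mod_cast h1j), List.foldl_append,
          ih (by omega)]
      show stepL L (_, _) (j : Int) = _
      unfold stepL
      have hjl : j - 1 < L.length := by omega
      have hread : PySem.List.pyGetD L ((j : Int) - 1) 0 = L[j - 1] := by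
        rw [show (j : Int) - 1 = ((j - 1 : Nat) : Int) by omega, PySem.List.pyGetD_natCast,
            List.getD_eq_getElem?_getD, List.getElem?_eq_getElem hjl]
        rfl
      have hse : (PySem.Set.ofList (L.take (j - 1))).add (PySem.List.pyGetD L ((j : Int) - 1) 0)
          = PySem.Set.ofList (L.take j) := by
        have ht : L.take j = L.take (j - 1) ++ [L[j - 1]] := by
          conv_lhs => rw [show j = (j - 1) + 1 by omega]
          rw [List.take_succ, List.getElem?_eq_getElem hjl]
          rfl
        rw [hread, ← ofList_snoc, ← ht]
      simp only [hse, Nat.add_sub_cancel]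
      refine Prod.ext rfl ?_
      show PySem.List.pySetD _ ((j : Int)) _ = _
      rw [PySem.List.pySetD_natCast, set_map_range _ _ (by omega : j < L.length)]
      apply List.map_congr_left
      intro k hk
      by_cases hkj : k = j
      · subst hkj
        rw [if_pos rfl, if_pos ⟨h1j, by omega⟩]
        rfl
      · rw [if_neg hkj]
        have hiff : (1 ≤ k ∧ k < j + 1) ↔ (1 ≤ k ∧ k < j) := by omega
        rw [if_congr hiff rfl rfl]

lemma dc_reverse (l : List Int) : dc l.reverse = dc l := dc_perm (List.reverse_perm l)

def leftF (L : List Int) : List Int :=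
  (List.range L.length).map (fun k => if 1 ≤ k ∧ k < L.length then dc (L.take k) else 0)

def stepD (L leftL : List Int) : (PySem.Set Int × List Int) → Int → (PySem.Set Int × List Int) :=
  fun st i =>
    let se := PySem.Set.add st.1 (PySem.List.pyGetD L (i + 1) 0)
    (se, PySem.List.pySetD st.2 i (PySem.List.pyGetD leftL i 0 - (se.length : Int)))

lemma leftF_read (L : List Int) (m : Nat) (hm : m < L.length) :
    PySem.List.pyGetD (leftF L) (m : Int) 0 = dc (L.take m) := by
  rw [PySem.List.pyGetD_natCast, List.getD_eq_getElem?_getD]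
  unfold leftF
  rw [List.getElem?_map, List.getElem?_range hm]
  by_cases h1 : 1 ≤ m
  · simp only [Option.map_some, Option.getD_some]
    rw [if_pos ⟨h1, hm⟩]
  · have h0 : m = 0 := by omega
    subst h0
    simp [dc]

lemma a_diff (L : List Int) :
    ∀ (m : Nat), m ≤ L.length - 1 →
    (PySem.List.pyRange ((m : Int) - 1) (-1) (-1)).foldl (stepD L (leftF L))
        (PySem.Set.ofList ((L.drop (m + 1)).reverse),
         (List.range L.length).map (fun k => if m ≤ k ∧ k < L.length - 1 then dc (L.take k) - dc (L.drop (k + 1)) else 0))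
      = (PySem.Set.ofList ((L.drop 1).reverse),
         (List.range L.length).map (fun k => if k < L.length - 1 then dc (L.take k) - dc (L.drop (k + 1)) else 0)) := by
  intro m
  induction m with
  | zero =>
    intro _
    rw [show ((0 : Nat) : Int) - 1 = (-1 : Int) by norm_num,
        PySem.List.pyRange_neg_one_eq_nil (by norm_num)]
    simp only [List.foldl_nil, Nat.zero_add]
    refine Prod.ext rfl (List.map_congr_left ?_)
    intro k _
    exact if_congr (by omega) rfl rfl
  | succ m ih =>
    intro hm
    have hml : m + 1 < L.length := by omega
    rw [show ((m + 1 : Nat) : Int) - 1 = (m : Int) by push_cast; ring,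
        PySem.List.pyRange_neg_one_cons (by omega), List.foldl_cons]
    have hread : PySem.List.pyGetD L ((m : Int) + 1) 0 = L[m + 1] := by
      rw [show (m : Int) + 1 = ((m + 1 : Nat) : Int) by push_cast; ring, PySem.List.pyGetD_natCast,
          List.getD_eq_getElem?_getD, List.getElem?_eq_getElem hml]
      rfl
    have hdrop : (L.drop (m + 1)).reverse = (L.drop (m + 1 + 1)).reverse ++ [L[m + 1]] := by
      conv_lhs => rw [List.drop_eq_getElem_cons hml]
      rw [List.reverse_cons]
    have hstep : stepD L (leftF L)
        (PySem.Set.ofList ((L.drop (m + 1 + 1)).reverse),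
         (List.range L.length).map (fun k => if m + 1 ≤ k ∧ k < L.length - 1 then dc (L.take k) - dc (L.drop (k + 1)) else 0))
        (m : Int)
        = (PySem.Set.ofList ((L.drop (m + 1)).reverse),
           (List.range L.length).map (fun k => if m ≤ k ∧ k < L.length - 1 then dc (L.take k) - dc (L.drop (k + 1)) else 0)) := by
      unfold stepD
      have hse : (PySem.Set.ofList ((L.drop (m + 1 + 1)).reverse)).add (PySem.List.pyGetD L ((m : Int) + 1) 0)
          = PySem.Set.ofList ((L.drop (m + 1)).reverse) := by
        rw [hread, ← ofList_snoc, ← hdrop]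
      simp only [hse]
      refine Prod.ext rfl ?_
      have hval : PySem.List.pyGetD (leftF L) (m : Int) 0
          - ((PySem.Set.ofList ((L.drop (m + 1)).reverse)).length : Int)
          = dc (L.take m) - dc (L.drop (m + 1)) := by
        rw [leftF_read L m (by omega)]
        have : ((PySem.Set.ofList ((L.drop (m + 1)).reverse)).length : Int) = dc ((L.drop (m + 1)).reverse) := rfl
        rw [this, dc_reverse]
      rw [hval, PySem.List.pySetD_natCast, set_map_range _ _ (by omega : m < L.length)]
      apply List.map_congr_left
      intro k _
      by_cases hkm : k = m
      · subst hkm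
        rw [if_pos rfl, if_pos ⟨Nat.le_refl _, by omega⟩]
      · rw [if_neg hkm]
        exact if_congr (by omega) rfl rfl
    rw [hstep]
    exact ih (by omega)

lemma pyGetD_neg_one (xs : List Int) (d : Int) (h : xs ≠ []) :
    PySem.List.pyGetD xs (-1) d = PySem.List.pyGetD xs ((xs.length - 1 : Nat) : Int) d := by
  have hl : 0 < xs.length := List.length_pos_iff.mpr h
  rw [PySem.List.pyGetD_natCast]
  simp only [PySem.List.pyGetD, PySem.List.pyGet?, PySem.List.pyIdx?]
  rw [if_neg (by omega), if_pos (by omega)]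
  simp [List.getD_eq_getElem?_getD]

lemma pySetD_neg_one (xs : List Int) (v : Int) (h : xs ≠ []) :
    PySem.List.pySetD xs (-1) v = xs.set (xs.length - 1) v := by
  have hl : 0 < xs.length := List.length_pos_iff.mpr h
  simp only [PySem.List.pySetD, PySem.List.pySet?, PySem.List.pyIdx?]
  rw [if_neg (by omega), if_pos (by omega)]
  simp

lemma a_eq' (N : Int) (A : List Int) (h1 : 1 ≤ N) (h2 : N ≤ A.length) :
    (let left := ((PySem.List.pyRange 1 N 1).foldl (stepL A)
          (PySem.Set.empty, (PySem.List.pyRange 0 N 1).map (fun _ => (0:Int)))).2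
     PySem.List.pySetD
       (((PySem.List.pyRange (N-2) (-1) (-1)).foldl (stepD A left)
         (PySem.Set.empty, (PySem.List.pyRange 0 N 1).map (fun _ => (0:Int)))).2)
       (-1) (PySem.List.pyGetD left (-1) 0))
      = (List.range N.toNat).map
          (fun k => dc ((A.take N.toNat).take k) - dc ((A.take N.toNat).drop (k + 1))) := by
  set L := A.take N.toNat with hL
  have hlen : L.length = N.toNat := by simp [hL]; omega
  have hn1 : 1 ≤ N.toNat := by omega
  have hNc : ((N.toNat : Nat) : Int) = N := by omega
  -- the zero-filled arrays
  have hl0 : ((PySem.List.pyRange 0 N 1).map (fun _ => (0:Int)))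
      = (List.range L.length).map (fun _ => (0:Int)) := by
    rw [PySem.List.pyRange_one, List.map_map, hlen, show N - 0 = N from by ring]
    rfl
  -- loop 1 reads A only at indices < N, where A and L agree
  have hAL1 : ∀ (acc : PySem.Set Int × List Int), ∀ i ∈ PySem.List.pyRange 1 N 1,
      stepL A acc i = stepL L acc i := by
    intro acc i hi
    rw [PySem.List.mem_pyRange_one] at hi
    unfold stepL
    have h3 : i - 1 = (((i - 1).toNat : Nat) : Int) := by omega
    rw [h3, PySem.List.pyGetD_natCast, PySem.List.pyGetD_natCast, hL,
        List.getD_eq_getElem?_getD, List.getD_eq_getElem?_getD, List.getElem?_take,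
        if_pos (by omega)]
  have hrange1 : PySem.List.pyRange 1 N 1 = PySem.List.pyRange 1 ((N.toNat : Nat) : Int) 1 := by
    rw [hNc]
  have hleft : ((PySem.List.pyRange 1 N 1).foldl (stepL A)
        (PySem.Set.empty, (PySem.List.pyRange 0 N 1).map (fun _ => (0:Int)))).2 = leftF L := by
    rw [PySem.List.foldl_congr_mem _ (stepL A) (stepL L) _ hAL1, hl0, hrange1, ← hlen,
        a_left L L.length (Nat.le_refl _)]
    rfl
  rw [hleft]
  show PySem.List.pySetD
      (((PySem.List.pyRange (N-2) (-1) (-1)).foldl (stepD A (leftF L))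
        (PySem.Set.empty, (PySem.List.pyRange 0 N 1).map (fun _ => (0:Int)))).2)
      (-1) (PySem.List.pyGetD (leftF L) (-1) 0)
    = (List.range N.toNat).map (fun k => dc (L.take k) - dc (L.drop (k + 1)))
  -- loop 2 reads A only at indices < N as well
  have hAL2 : ∀ (acc : PySem.Set Int × List Int), ∀ i ∈ PySem.List.pyRange (N-2) (-1) (-1),
      stepD A (leftF L) acc i = stepD L (leftF L) acc i := by
    intro acc i hi
    rw [PySem.List.mem_pyRange_neg_one] at hi
    unfold stepD
    have h3 : i + 1 = (((i + 1).toNat : Nat) : Int) := by omega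
    rw [h3, PySem.List.pyGetD_natCast, PySem.List.pyGetD_natCast, hL,
        List.getD_eq_getElem?_getD, List.getD_eq_getElem?_getD, List.getElem?_take,
        if_pos (by omega)]
  have hstart : N - 2 = ((L.length - 1 : Nat) : Int) - 1 := by
    rw [hlen]; omega
  have hempty : (PySem.Set.empty : PySem.Set Int)
      = PySem.Set.ofList ((L.drop ((L.length - 1) + 1)).reverse) := by
    rw [show (L.length - 1) + 1 = L.length by omega, List.drop_length]
    rfl
  have hd0 : ((PySem.List.pyRange 0 N 1).map (fun _ => (0:Int)))
      = (List.range L.length).map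
          (fun k => if L.length - 1 ≤ k ∧ k < L.length - 1 then dc (L.take k) - dc (L.drop (k + 1)) else 0) := by
    rw [hl0]
    apply List.map_congr_left
    intro k _
    exact (if_neg (by omega)).symm
  have hdiff : ((PySem.List.pyRange (N-2) (-1) (-1)).foldl (stepD A (leftF L))
        (PySem.Set.empty, (PySem.List.pyRange 0 N 1).map (fun _ => (0:Int)))).2
      = (List.range L.length).map
          (fun k => if k < L.length - 1 then dc (L.take k) - dc (L.drop (k + 1)) else 0) := by
    rw [PySem.List.foldl_congr_mem _ (stepD A (leftF L)) (stepD L (leftF L)) _ hAL2,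
        hstart, hempty, hd0, a_diff L (L.length - 1) (Nat.le_refl _)]
  rw [hdiff]
  -- the final diff[-1] = left[-1] write
  have hne : (List.range L.length).map
      (fun k => if k < L.length - 1 then dc (L.take k) - dc (L.drop (k + 1)) else 0) ≠ [] := by
    simp [hlen]; omega
  have hlne : leftF L ≠ [] := by
    unfold leftF
    simp [hlen]; omega
  have hlflen : (leftF L).length = L.length := by simp [leftF]
  have hread : PySem.List.pyGetD (leftF L) (-1) 0 = dc (L.take (L.length - 1)) := by
    rw [pyGetD_neg_one _ _ hlne, hlflen, leftF_read L (L.length - 1) (by omega)]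
  rw [hread, pySetD_neg_one _ _ hne]
  have hslen : ((List.range L.length).map
      (fun k => if k < L.length - 1 then dc (L.take k) - dc (L.drop (k + 1)) else 0)).length
      = L.length := by simp
  rw [hslen, set_map_range _ _ (by omega : L.length - 1 < L.length), ← hlen]
  apply List.map_congr_left
  intro k hk
  rw [List.mem_range] at hk
  by_cases hkl : k = L.length - 1
  · subst hkl
    rw [if_pos rfl, show (L.length - 1) + 1 = L.length by omega, List.drop_length]
    rw [dc_nil]
    ring
  · rw [if_neg hkl, if_pos (by omega)]

lemma b_eq (N : Int) (A : List Int) (h1 : 1 ≤ N) (h2 : N ≤ A.length) :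
    getDistinctDifference_alt N A
      = (List.range N.toNat).map
          (fun k => dc ((A.take N.toNat).take k) - dc ((A.take N.toNat).drop (k + 1))) := by
  unfold getDistinctDifference_alt
  exact b_eq' N A h1 h2

lemma a_eq (N : Int) (A : List Int) (h1 : 1 ≤ N) (h2 : N ≤ A.length) :
    getDistinctDifference N A
      = (List.range N.toNat).map
          (fun k => dc ((A.take N.toNat).take k) - dc ((A.take N.toNat).drop (k + 1))) := by
  unfold getDistinctDifference
  exact a_eq' N A h1 h2

-- ===== VERDICT =====
theorem getDistinctDifference_spec : Claim_equal_getDistinctDifference := by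
  intro N A _ hPre
  unfold Spec_getDistinctDifference
  rw [a_eq N A hPre.1 (by exact_mod_cast hPre.2), b_eq N A hPre.1 (by exact_mod_cast hPre.2)]
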